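-- pv_equiv track=rewrite | github.com/LoftSpace/Algorithm | 프로그래머스/2/17679. ［1차］ 프렌즈4블록/［1차］ 프렌즈4블록.py | solution
-- ===== SOURCE A (Python) =====
-- def solution(m, n, boards):
--     board = []
--     answer = 0
--
--     for i in boards :
--         board.append(list(i))
--
--     def update_board():
--         for col in range(n):
--             temp = []
--             for row in range(m-1,-1,-1):
--                 if board[row][col] != '0' :
--                     temp.append(board[row][col])
--             for i in range(m - len(temp)):
--                 temp.append('0')
--
--             for row in range(m):
--                 board[row][col] = temp[-row-1]
--
--     def delete(delete_position):
--         count = 0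
--         for position in delete_position:
--             row = position // n
--             col = position % n
--             board[row][col] = '0'
--             count += 1
--
--         return count
--     def check():
--
--         delete_position = set()
--         for start_row in range(m - 1):
--             for start_col in range(n - 1):
--                 if board[start_row][start_col] != '0' and board[start_row][start_col] == board[start_row][start_col + 1] and board[start_row][start_col] == board[start_row + 1][start_col] and board[start_row][start_col] == board[start_row + 1][start_col + 1] :
--                     delete_position.add(start_row * n + start_col)
--                     delete_position.add((start_row + 1) * n + start_col)
--                     delete_position.add((start_row) * n + start_col + 1)
--                     delete_position.add((start_row + 1) * n + start_col + 1)
--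
--         return delete(delete_position)
--
--
--
--
--     while  True :
--         a = check()
--         if a == 0 :
--             break
--         else :
--             answer += a
--             update_board()
--
--     return answer
-- ===== SOURCE B (Python) =====
-- def solution(m, n, boards):
--     if m < 2 or n < 2:
--         return 0
--     # column stacks, bottom-first; '0' is A's empty marker, dropped up front
--     cols = [[boards[r][c] for r in range(m - 1, -1, -1) if boards[r][c] != '0']
--             for c in range(n)]
--     total = 0
--     while True:
--         dead = set()
--         for c in range(n - 1):
--             left, right = cols[c], cols[c + 1]
--             for k in range(min(len(left), len(right)) - 1):
--                 v = left[k]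
--                 if v == left[k + 1] and v == right[k] and v == right[k + 1]:
--                     dead.update({(c, k), (c, k + 1), (c + 1, k), (c + 1, k + 1)})
--         if not dead:
--             return total
--         total += len(dead)
--         cols = [[v for k, v in enumerate(col) if (c, k) not in dead]
--                 for c, col in enumerate(cols)]
-- ===== Notes on version B (the rewrite author's own statement) =====
-- stated objective: alternative
-- what changed: B replaces A's fixed m-by-n character grid (with '0' sentinels, in-place deletes keyed by flat integer positions, and a pad-and-rewrite gravity pass) by a list of n column stacks (bottom-first, empties dropped up front): matches are found by scanning adjacent column pairs over heights, deleted cells are (col,height) pairs, and gravity is just filtering each column, letting it shrink.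
-- outside the precondition, e.g. on solution(3, 2, ['AA', '00', 'AA']): A returns 0, B returns 4
import Mathlib
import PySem

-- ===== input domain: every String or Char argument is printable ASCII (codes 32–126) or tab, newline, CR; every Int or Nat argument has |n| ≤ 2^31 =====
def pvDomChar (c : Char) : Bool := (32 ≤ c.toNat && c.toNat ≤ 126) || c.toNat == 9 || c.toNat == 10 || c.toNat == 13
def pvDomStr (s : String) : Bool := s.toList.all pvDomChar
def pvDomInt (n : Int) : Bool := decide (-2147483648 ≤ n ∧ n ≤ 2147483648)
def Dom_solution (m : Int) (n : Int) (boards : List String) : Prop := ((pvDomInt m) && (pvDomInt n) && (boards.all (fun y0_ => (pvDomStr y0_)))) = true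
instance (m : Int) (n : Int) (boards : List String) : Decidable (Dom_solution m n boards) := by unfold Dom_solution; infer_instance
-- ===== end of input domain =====

-- B replaces A's fixed m×n grid with '0' sentinels (flat-integer delete positions, pad-and-rewrite
-- gravity) by a list of column stacks (bottom-first, empties dropped; gravity = filtering a column).
-- Alternative structure, not claimed faster.

-- ===== PORT A =====
-- board cell read/write; Python indexes are in range on every admitted input,
-- so total getD/set-based access is exact there.
def aGet (g : List (List Char)) (r c : Nat) : Char := (g.getD r []).getD c '0'

def aSet (g : List (List Char)) (r c : Nat) (v : Char) : List (List Char) :=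
  g.modify r (fun row => row.set c v)

-- the 2×2 test of check(), in A's order
def aMatch (g : List (List Char)) (r c : Nat) : Bool :=
  aGet g r c != '0' && aGet g r c == aGet g r (c+1) &&
    aGet g r c == aGet g (r+1) c && aGet g r c == aGet g (r+1) (c+1)

-- check(): collect the Python set of flat positions over the double range scan
def aScan (m n : Int) (g : List (List Char)) : PySem.Set Int :=
  (PySem.List.pyRange 0 (m-1) 1).foldl (fun s r =>
    (PySem.List.pyRange 0 (n-1) 1).foldl (fun s c =>
      if aMatch g r.toNat c.toNat then
        PySem.Set.add (PySem.Set.add (PySem.Set.add (PySem.Set.add s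
          (r*n+c)) ((r+1)*n+c)) (r*n+c+1)) ((r+1)*n+c+1)
      else s) s) PySem.Set.empty

-- delete(): zero out each position (row = pos//n, col = pos%n; both ≥ 0 here), counting
def aDelete (n : Int) (g : List (List Char)) (s : List Int) : List (List Char) × Int :=
  s.foldl (fun gc p =>
    (aSet gc.1 (PySem.Int.floordiv p n).toNat (PySem.Int.mod p n).toNat '0', gc.2 + 1)) (g, 0)

-- update_board(): per column, collect non-'0' bottom-up, pad with '0', rewrite via temp[-row-1]
def aUpdate (m n : Int) (g : List (List Char)) : List (List Char) :=
  (PySem.List.pyRange 0 n 1).foldl (fun g c =>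
    let temp0 := (PySem.List.pyRange (m-1) (-1) (-1)).foldl
      (fun t r => if aGet g r.toNat c.toNat != '0' then t ++ [aGet g r.toNat c.toNat] else t)
      ([] : List Char)
    let temp := temp0 ++ List.replicate (m - (temp0.length : Int)).toNat '0'
    (PySem.List.pyRange 0 m 1).foldl
      (fun g r => aSet g r.toNat c.toNat (PySem.List.pyGetD temp (-r-1) '0')) g) g

-- while True: a = check(); if a == 0: break; answer += a; update_board()
-- (fuel only makes the loop total; each productive round removes ≥ 1 of ≤ m*n cells)
def aLoop (m n : Int) : Nat → List (List Char) → Int → Int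
  | 0, _, ans => ans
  | fuel+1, g, ans =>
    let gc := aDelete n g (aScan m n g)
    if gc.2 = 0 then ans else aLoop m n fuel (aUpdate m n gc.1) (ans + gc.2)

def solution (m : Int) (n : Int) (boards : List String) : Int :=
  aLoop m n (m.toNat * n.toNat + 1) (boards.map String.toList) 0

-- ===== PORT B =====
def bGet (col : List Char) (k : Nat) : Char := col.getD k '0'

-- column stacks, bottom-first, '0' cells dropped
def bCols (m n : Int) (boards : List String) : List (List Char) :=
  (PySem.List.pyRange 0 n 1).map (fun c =>
    (PySem.List.pyRange (m-1) (-1) (-1)).foldl (fun col r =>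
      let v := ((boards.getD r.toNat "").toList).getD c.toNat '0'
      if v != '0' then col ++ [v] else col) [])

def bMatch (left right : List Char) (k : Nat) : Bool :=
  bGet left k == bGet left (k+1) && bGet left k == bGet right k && bGet left k == bGet right (k+1)

-- dead set of (column, height) pairs over adjacent column pairs
def bScan (n : Int) (cols : List (List Char)) : PySem.Set (Int × Int) :=
  (PySem.List.pyRange 0 (n-1) 1).foldl (fun s c =>
    let left := cols.getD c.toNat []
    let right := cols.getD (c.toNat+1) []
    (PySem.List.pyRange 0 (min (left.length : Int) (right.length : Int) - 1) 1).foldl (fun s k =>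
      if bMatch left right k.toNat then
        PySem.Set.update s [(c,k), (c,k+1), (c+1,k), (c+1,k+1)]
      else s) s) PySem.Set.empty

-- gravity: a column keeps its surviving blocks, in order
def bRebuild (dead : PySem.Set (Int × Int)) (cols : List (List Char)) : List (List Char) :=
  (PySem.List.enumerate cols).map (fun p =>
    ((PySem.List.enumerate p.2).filter (fun q => !(PySem.Set.contains dead (p.1, q.1)))).map (·.2))

def bLoop (n : Int) : Nat → List (List Char) → Int → Int
  | 0, _, total => total
  | fuel+1, cols, total =>
    let dead := bScan n cols
    if dead = [] then total
    else bLoop n fuel (bRebuild dead cols) (total + PySem.Set.len dead)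

def solution_alt (m : Int) (n : Int) (boards : List String) : Int :=
  if m < 2 ∨ n < 2 then 0
  else bLoop n (m.toNat * n.toNat + 1) (bCols m n boards) 0

-- ===== PRECONDITION & SPEC =====
-- Pre_ excludes (a) inputs where A raises IndexError (fewer than m rows, or a scanned row
-- shorter than n) and (b) boards with a literal '0' inside the scanned m×n region, on which
-- A's reading of '0' as an already-empty mid-stack hole is an artefact of its sentinel
-- encoding (B compacts such holes away up front).
def Pre_solution (m : Int) (n : Int) (boards : List String) : Prop :=
  2 ≤ m → 2 ≤ n →
    (m ≤ (boards.length : Int) ∧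
      ∀ s ∈ boards.take m.toNat, n ≤ (s.length : Int) ∧ '0' ∉ s.toList.take n.toNat)
instance (m : Int) (n : Int) (boards : List String) : Decidable (Pre_solution m n boards) := by
  unfold Pre_solution; infer_instance

def pvWitness_solution : Int × Int × List String := (2, 2, ["AA", "AB"])

def Spec_solution (m : Int) (n : Int) (boards : List String) (out : Int) : Prop := out = solution_alt m n boards
instance (m : Int) (n : Int) (boards : List String) (out : Int) : Decidable (Spec_solution m n boards out) := by unfold Spec_solution; infer_instance

-- ===== CLAIM (what is proved, stated in full; the proofs are below) =====
def Claim_equal_solution : Prop := ∀ (m : Int) (n : Int) (boards : List String), Dom_solution m n boards → Pre_solution m n boards → Spec_solution m n boards (solution m n boards)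

-- ===== LEMMAS AND PROOFS =====

-- proof-side view: a settled column t (bottom-first, '0'-free) seen at grid row i
def colAt (M : Nat) (t : List Char) (i : Nat) : Char :=
  if i < M - t.length then '0' else t.getD (M - 1 - i) '0'

-- flat position of cell (r, c) in an M×N grid
def encP (N r c : Nat) : Int := ((r * N + c : Nat) : Int)

def Shape (M N : Nat) (g : List (List Char)) : Prop :=
  M ≤ g.length ∧ ∀ i < M, N ≤ (g.getD i []).length

-- the simulation relation: A's grid g is settled and column j reads as B's stack cols[j]
def RepAB (M N : Nat) (g cols : List (List Char)) : Prop :=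
  Shape M N g ∧ cols.length = N ∧
    ∀ j < N, (cols.getD j []).length ≤ M ∧ '0' ∉ cols.getD j [] ∧
      ∀ i < M, aGet g i j = colAt M (cols.getD j []) i

-- membership spec of A's delete set
def PA (M N : Nat) (g : List (List Char)) (p : Int) : Prop :=
  ∃ r c : Nat, r + 1 < M ∧ c + 1 < N ∧ aMatch g r c = true ∧
    (p = encP N r c ∨ p = encP N (r+1) c ∨ p = encP N r (c+1) ∨ p = encP N (r+1) (c+1))

-- membership spec of B's dead set
def PB (N : Nat) (cols : List (List Char)) (q : Int × Int) : Prop :=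
  ∃ c k : Nat, c + 1 < N ∧
    k + 1 < min (cols.getD c []).length (cols.getD (c+1) []).length ∧
    bMatch (cols.getD c []) (cols.getD (c+1) []) k = true ∧
    (q = ((c:Int),(k:Int)) ∨ q = ((c:Int),(k:Int)+1) ∨ q = ((c:Int)+1,(k:Int)) ∨ q = ((c:Int)+1,(k:Int)+1))

-- generic: membership through a foldl whose step only adds elements
theorem mem_foldl_step {α β : Type} [BEq α] [LawfulBEq α]
    (step : PySem.Set α → β → PySem.Set α) (P : β → α → Prop)
    (h : ∀ s b x, x ∈ step s b ↔ x ∈ s ∨ P b x) :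
    ∀ (l : List β) (s : PySem.Set α) (x : α),
      (x ∈ l.foldl step s ↔ x ∈ s ∨ ∃ b ∈ l, P b x) := by
  intro l
  induction l with
  | nil => intro s x; simp
  | cons b l ih =>
    intro s x
    simp only [List.foldl_cons, ih, h, List.mem_cons]
    constructor
    · rintro ((hx | hP) | ⟨b', hb', hP⟩)
      · exact Or.inl hx
      · exact Or.inr ⟨b, Or.inl rfl, hP⟩
      · exact Or.inr ⟨b', Or.inr hb', hP⟩
    · rintro (hx | ⟨b', (rfl | hb'), hP⟩)
      · exact Or.inl (Or.inl hx)
      · exact Or.inl (Or.inr hP)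
      · exact Or.inr ⟨b', hb', hP⟩

theorem nodup_foldl_step {α β : Type} (step : PySem.Set α → β → PySem.Set α)
    (h : ∀ s b, s.Nodup → (step s b).Nodup) :
    ∀ (l : List β) (s : PySem.Set α), s.Nodup → (l.foldl step s).Nodup := by
  intro l
  induction l with
  | nil => intro s hs; simpa using hs
  | cons b l ih => intro s hs; exact ih _ (h s b hs)

theorem mem_aScan (M N : Nat) (g : List (List Char)) (p : Int) :
    p ∈ aScan (M : Int) (N : Int) g ↔ PA M N g p := by
  have inner : ∀ (r : Int) (s : PySem.Set Int) (x : Int),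
      x ∈ (PySem.List.pyRange 0 ((N:Int)-1)).foldl (fun s c =>
          if aMatch g r.toNat c.toNat then
            PySem.Set.add (PySem.Set.add (PySem.Set.add (PySem.Set.add s
              (r*(N:Int)+c)) ((r+1)*(N:Int)+c)) (r*(N:Int)+c+1)) ((r+1)*(N:Int)+c+1)
          else s) s ↔
        x ∈ s ∨ ∃ c ∈ PySem.List.pyRange 0 ((N:Int)-1), aMatch g r.toNat c.toNat = true ∧
          (x = r*(N:Int)+c ∨ x = (r+1)*(N:Int)+c ∨ x = r*(N:Int)+c+1 ∨ x = (r+1)*(N:Int)+c+1) := by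
    intro r s x
    apply mem_foldl_step
    intro s c x
    by_cases hm : aMatch g r.toNat c.toNat = true
    · simp only [hm, if_true, PySem.Set.mem_add, true_and]
      tauto
    · simp [hm]
  unfold aScan
  rw [mem_foldl_step _
      (fun r x => ∃ c ∈ PySem.List.pyRange 0 ((N:Int)-1), aMatch g r.toNat c.toNat = true ∧
          (x = r*(N:Int)+c ∨ x = (r+1)*(N:Int)+c ∨ x = r*(N:Int)+c+1 ∨ x = (r+1)*(N:Int)+c+1))
      (fun s r x => inner r s x)]
  unfold PA
  constructor
  · rintro (h | ⟨r, hr, c, hc, hm, hx⟩)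
    · simp [PySem.Set.empty] at h
    · rw [PySem.List.mem_pyRange_one] at hr hc
      have hr' : ((r.toNat : Int)) = r := Int.toNat_of_nonneg hr.1
      have hc' : ((c.toNat : Int)) = c := Int.toNat_of_nonneg hc.1
      refine ⟨r.toNat, c.toNat, by omega, by omega, hm, ?_⟩
      unfold encP
      rcases hx with rfl | rfl | rfl | rfl
      · left; push_cast [hr', hc']; ring
      · right; left; push_cast [hr', hc']; ring
      · right; right; left; push_cast [hr', hc']; ring
      · right; right; right; push_cast [hr', hc']; ring
  · rintro ⟨r, c, hr, hc, hm, hx⟩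
    refine Or.inr ⟨(r:Int), ?_, (c:Int), ?_, ?_, ?_⟩
    · rw [PySem.List.mem_pyRange_one]; omega
    · rw [PySem.List.mem_pyRange_one]; omega
    · simpa using hm
    · unfold encP at hx
      rcases hx with rfl | rfl | rfl | rfl
      · left; push_cast; ring
      · right; left; push_cast; ring
      · right; right; left; push_cast; ring
      · right; right; right; push_cast; ring

theorem nodup_aScan (m n : Int) (g : List (List Char)) : (aScan m n g).Nodup := by
  unfold aScan
  apply nodup_foldl_step
  · intro s r hs
    apply nodup_foldl_step
    · intro s c hs'
      by_cases hm : aMatch g r.toNat c.toNat = true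
      · simp only [hm, if_true]
        exact PySem.Set.nodup_add _ _ (PySem.Set.nodup_add _ _ (PySem.Set.nodup_add _ _
          (PySem.Set.nodup_add _ _ hs')))
      · simpa [hm] using hs'
    · exact hs
  · exact List.nodup_nil

theorem mem_bScan (N : Nat) (cols : List (List Char)) (q : Int × Int) :
    q ∈ bScan (N : Int) cols ↔ PB N cols q := by
  have inner : ∀ (c : Int) (s : PySem.Set (Int × Int)) (x : Int × Int),
      x ∈ (PySem.List.pyRange 0
            (min ((cols.getD c.toNat []).length : Int) ((cols.getD (c.toNat+1) []).length : Int) - 1)).foldl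
          (fun s k =>
            if bMatch (cols.getD c.toNat []) (cols.getD (c.toNat+1) []) k.toNat then
              PySem.Set.update s [(c,k), (c,k+1), (c+1,k), (c+1,k+1)]
            else s) s ↔
        x ∈ s ∨ ∃ k ∈ PySem.List.pyRange 0
            (min ((cols.getD c.toNat []).length : Int) ((cols.getD (c.toNat+1) []).length : Int) - 1),
          bMatch (cols.getD c.toNat []) (cols.getD (c.toNat+1) []) k.toNat = true ∧
          (x = (c,k) ∨ x = (c,k+1) ∨ x = (c+1,k) ∨ x = (c+1,k+1)) := by
    intro c s x
    apply mem_foldl_step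
    intro s k x
    by_cases hm : bMatch (cols.getD c.toNat []) (cols.getD (c.toNat+1) []) k.toNat = true
    · simp only [hm, if_true, PySem.Set.mem_update, true_and, List.mem_cons, List.not_mem_nil,
        or_false]
    · rw [if_neg hm]
      constructor
      · exact Or.inl
      · rintro (h | ⟨hmm, _⟩)
        · exact h
        · exact absurd hmm hm
  have hb : bScan (N:Int) cols = (PySem.List.pyRange 0 ((N:Int)-1)).foldl (fun s c =>
      (PySem.List.pyRange 0
          (min ((cols.getD c.toNat []).length : Int) ((cols.getD (c.toNat+1) []).length : Int) - 1)).foldl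
        (fun s k =>
          if bMatch (cols.getD c.toNat []) (cols.getD (c.toNat+1) []) k.toNat then
            PySem.Set.update s [(c,k), (c,k+1), (c+1,k), (c+1,k+1)]
          else s) s) PySem.Set.empty := rfl
  rw [hb]
  rw [mem_foldl_step
      (fun s c =>
        (PySem.List.pyRange 0
            (min ((cols.getD c.toNat []).length : Int) ((cols.getD (c.toNat+1) []).length : Int) - 1)).foldl
          (fun s k =>
            if bMatch (cols.getD c.toNat []) (cols.getD (c.toNat+1) []) k.toNat then
              PySem.Set.update s [(c,k), (c,k+1), (c+1,k), (c+1,k+1)]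
            else s) s)
      (fun c x => ∃ k ∈ PySem.List.pyRange 0
            (min ((cols.getD c.toNat []).length : Int) ((cols.getD (c.toNat+1) []).length : Int) - 1),
          bMatch (cols.getD c.toNat []) (cols.getD (c.toNat+1) []) k.toNat = true ∧
          (x = (c,k) ∨ x = (c,k+1) ∨ x = (c+1,k) ∨ x = (c+1,k+1)))
      (fun s c x => inner c s x)]
  unfold PB
  constructor
  · rintro (h | ⟨c, hc, k, hk, hm, hx⟩)
    · simp [PySem.Set.empty] at h
    · rw [PySem.List.mem_pyRange_one] at hc hk
      have hc' : ((c.toNat : Int)) = c := Int.toNat_of_nonneg hc.1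
      have hk' : ((k.toNat : Int)) = k := Int.toNat_of_nonneg hk.1
      refine ⟨c.toNat, k.toNat, by omega, by omega, hm, ?_⟩
      rcases hx with rfl | rfl | rfl | rfl
      · left; rw [hc', hk']
      · right; left; rw [hc', hk']
      · right; right; left; rw [hc', hk']
      · right; right; right; rw [hc', hk']
  · rintro ⟨c, k, hc, hk, hm, hx⟩
    have hcn : ((c:Int)).toNat = c := by omega
    have hkn : ((k:Int)).toNat = k := by omega
    refine Or.inr ⟨(c:Int), ?_, (k:Int), ?_, ?_, ?_⟩
    · rw [PySem.List.mem_pyRange_one]; omega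
    · rw [PySem.List.mem_pyRange_one, hcn]; omega
    · rw [hcn, hkn]; exact hm
    · rcases hx with rfl | rfl | rfl | rfl
      · left; rfl
      · right; left; rfl
      · right; right; left; rfl
      · right; right; right; rfl

theorem nodup_bScan (n : Int) (cols : List (List Char)) : (bScan n cols).Nodup := by
  unfold bScan
  apply nodup_foldl_step
  · intro s c hs
    apply nodup_foldl_step
    · intro s k hs'
      by_cases hm : bMatch (cols.getD c.toNat []) (cols.getD (c.toNat+1) []) k.toNat = true
      · simp only [hm, if_true]
        exact PySem.Set.nodup_update _ _ hs'
      · rw [if_neg hm]; exact hs'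
    · exact hs
  · exact List.nodup_nil

-- decoding flat positions
theorem encP_decode (N r c : Nat) (hc : c < N) :
    PySem.Int.floordiv (encP N r c) (N : Int) = (r : Int) ∧
      PySem.Int.mod (encP N r c) (N : Int) = (c : Int) := by
  have hN : (0:Int) < (N:Int) := by exact_mod_cast Nat.pos_of_ne_zero (by omega)
  have h1 : PySem.Int.floordiv (encP N r c) (N : Int) = (r : Int) := by
    rw [PySem.Int.floordiv_eq_iff_of_pos hN]
    unfold encP
    constructor
    · push_cast; nlinarith [Nat.zero_le c]
    · push_cast; nlinarith [hc]
  refine ⟨h1, ?_⟩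
  have h2 := PySem.Int.floordiv_mul_add_mod (encP N r c) (N : Int)
  rw [h1] at h2
  unfold encP at h2 ⊢
  push_cast at h2 ⊢
  linarith

theorem encP_inj (N r c r' c' : Nat) (hc : c < N) (hc' : c' < N) :
    encP N r c = encP N r' c' → r = r' ∧ c = c' := by
  intro h
  have hN : 0 < N := by omega
  have h1 := (encP_decode N r c hc).1
  have h2 := (encP_decode N r c hc).2
  have h3 := (encP_decode N r' c' hc').1
  have h4 := (encP_decode N r' c' hc').2
  rw [h] at h1 h2
  rw [h1] at h3; rw [h2] at h4
  exact ⟨by exact_mod_cast h3, by exact_mod_cast h4⟩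

-- every deleted A-position is a cell of the scanned region
theorem PA_form (M N : Nat) (g : List (List Char)) (p : Int) (h : PA M N g p) :
    ∃ r c : Nat, r < M ∧ c < N ∧ p = encP N r c := by
  obtain ⟨r, c, hr, hc, _, hp⟩ := h
  rcases hp with rfl | rfl | rfl | rfl
  · exact ⟨r, c, by omega, by omega, rfl⟩
  · exact ⟨r+1, c, by omega, by omega, rfl⟩
  · exact ⟨r, c+1, by omega, by omega, rfl⟩
  · exact ⟨r+1, c+1, by omega, by omega, rfl⟩

theorem colAt_eq_zero (M : Nat) (t : List Char) (i : Nat) (h : i < M - t.length) :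
    colAt M t i = '0' := if_pos h

theorem colAt_eq_get (M : Nat) (t : List Char) (i : Nat) (h : ¬ i < M - t.length) :
    colAt M t i = t.getD (M - 1 - i) '0' := if_neg h

theorem getD_ne_zero (t : List Char) (ht : '0' ∉ t) (k : Nat) (hk : k < t.length) :
    t.getD k '0' ≠ '0' := by
  rw [List.getD_eq_getElem?_getD, List.getElem?_eq_getElem hk]
  intro h
  exact ht (h ▸ List.getElem_mem hk)

theorem colAt_ne_zero_bound (M : Nat) (t : List Char) (i : Nat)
    (h : colAt M t i ≠ '0') : ¬ i < M - t.length := by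
  intro hlt
  exact h (colAt_eq_zero M t i hlt)

theorem PB_form (M N : Nat) (g cols : List (List Char)) (hRep : RepAB M N g cols)
    (q : Int × Int) (h : PB N cols q) :
    ∃ c k : Nat, c < N ∧ k < M ∧ q = ((c:Int),(k:Int)) := by
  obtain ⟨_, _, hcol⟩ := hRep
  obtain ⟨c, k, hc, hk, _, hx⟩ := h
  have hL := (hcol c (by omega)).1
  rcases hx with rfl | rfl | rfl | rfl
  · exact ⟨c, k, by omega, by omega, rfl⟩
  · exact ⟨c, k+1, by omega, by omega, by push_cast; rfl⟩
  · exact ⟨c+1, k, by omega, by omega, by push_cast; rfl⟩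
  · exact ⟨c+1, k+1, by omega, by omega, by push_cast; rfl⟩

-- the heart: cell (i,j) is deleted by A iff stack cell (j, M-1-i) is deleted by B
theorem PA_iff_PB (M N : Nat) (g cols : List (List Char)) (hRep : RepAB M N g cols)
    (i j : Nat) (hi : i < M) (hj : j < N) :
    PA M N g (encP N i j) ↔ PB N cols ((j:Int), ((M-1-i : Nat) : Int)) := by
  obtain ⟨⟨hgl, hgr⟩, hclen, hcol⟩ := hRep
  constructor
  · rintro ⟨r, c, hr, hc, hm, hx⟩
    obtain ⟨hLm, hL0, hLv⟩ := hcol c (by omega)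
    obtain ⟨hRm, hR0, hRv⟩ := hcol (c+1) (by omega)
    simp only [aMatch, Bool.and_eq_true, bne_iff_ne, ne_eq, beq_iff_eq] at hm
    obtain ⟨⟨⟨h0, e1⟩, e2⟩, e3⟩ := hm
    rw [hLv r (by omega)] at h0 e1 e2 e3
    rw [hRv r (by omega)] at e1
    rw [hLv (r+1) (by omega)] at e2
    rw [hRv (r+1) (by omega)] at e3
    have hbL : ¬ r < M - (cols.getD c []).length := colAt_ne_zero_bound _ _ _ h0
    have hbR : ¬ r < M - (cols.getD (c+1) []).length := by
      apply colAt_ne_zero_bound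
      rw [← e1]; exact h0
    rw [colAt_eq_get _ _ _ hbL] at e1 e2 e3
    rw [colAt_eq_get _ _ _ (by omega)] at e2
    rw [colAt_eq_get _ _ _ hbR] at e1
    rw [colAt_eq_get _ _ _ (by omega)] at e3
    have hkL : (M-2-r) + 1 < (cols.getD c []).length := by omega
    have hkR : (M-2-r) + 1 < (cols.getD (c+1) []).length := by omega
    have hidx1 : M - 1 - r = (M-2-r) + 1 := by omega
    have hidx2 : M - 1 - (r+1) = M-2-r := by omega
    have hbm : bMatch (cols.getD c []) (cols.getD (c+1) []) (M-2-r) = true := by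
      simp only [bMatch, bGet, Bool.and_eq_true, beq_iff_eq]
      rw [hidx1] at e1 e2 e3
      rw [hidx2] at e2 e3
      exact ⟨⟨e2.symm, by rw [← e2]; exact e3⟩, by rw [← e2]; exact e1⟩
    refine ⟨c, M-2-r, hc, by omega, hbm, ?_⟩
    rcases hx with hx | hx | hx | hx
    · obtain ⟨hir, hjc⟩ := encP_inj N i j r c hj (by omega) hx
      right; left
      have h1 : ((j:Int)) = (c:Int) := by omega
      have h2 : (((M-1-i : Nat)):Int) = ((M-2-r : Nat):Int) + 1 := by omega
      rw [h1, h2]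
    · obtain ⟨hir, hjc⟩ := encP_inj N i j (r+1) c hj (by omega) hx
      left
      have h1 : ((j:Int)) = (c:Int) := by omega
      have h2 : (((M-1-i : Nat)):Int) = ((M-2-r : Nat):Int) := by omega
      rw [h1, h2]
    · obtain ⟨hir, hjc⟩ := encP_inj N i j r (c+1) hj (by omega) hx
      right; right; right
      have h1 : ((j:Int)) = (c:Int) + 1 := by omega
      have h2 : (((M-1-i : Nat)):Int) = ((M-2-r : Nat):Int) + 1 := by omega
      rw [h1, h2]
    · obtain ⟨hir, hjc⟩ := encP_inj N i j (r+1) (c+1) hj (by omega) hx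
      right; right; left
      have h1 : ((j:Int)) = (c:Int) + 1 := by omega
      have h2 : (((M-1-i : Nat)):Int) = ((M-2-r : Nat):Int) := by omega
      rw [h1, h2]
  · rintro ⟨c, k, hc, hk, hbm, hx⟩
    obtain ⟨hLm, hL0, hLv⟩ := hcol c (by omega)
    obtain ⟨hRm, hR0, hRv⟩ := hcol (c+1) (by omega)
    simp only [bMatch, bGet, Bool.and_eq_true, beq_iff_eq] at hbm
    obtain ⟨⟨e1, e2⟩, e3⟩ := hbm
    have hM2 : k + 2 ≤ M := by omega
    have hr1 : (M-2-k) + 1 < M := by omega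
    have hidx1 : M - 1 - (M-2-k) = k + 1 := by omega
    have hidx2 : M - 1 - ((M-2-k)+1) = k := by omega
    have hm : aMatch g (M-2-k) c = true := by
      simp only [aMatch, Bool.and_eq_true, bne_iff_ne, ne_eq, beq_iff_eq]
      rw [hLv (M-2-k) (by omega), hRv (M-2-k) (by omega),
        hLv ((M-2-k)+1) (by omega), hRv ((M-2-k)+1) (by omega)]
      rw [colAt_eq_get _ _ _ (by omega), colAt_eq_get _ _ _ (by omega),
        colAt_eq_get _ _ _ (by omega), colAt_eq_get _ _ _ (by omega)]
      rw [hidx1, hidx2]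
      refine ⟨⟨⟨getD_ne_zero _ hL0 (k+1) (by omega), ?_⟩, ?_⟩, ?_⟩
      · rw [← e1]; exact e3
      · exact e1.symm
      · rw [← e1]; exact e2
    refine ⟨M-2-k, c, hr1, hc, hm, ?_⟩
    rcases hx with hx | hx | hx | hx
    · have h1 : j = c := by
        have := congrArg Prod.fst hx; simp at this; exact_mod_cast this
      have h2 : i = (M-2-k) + 1 := by
        have := congrArg Prod.snd hx; simp at this
        have hMk : M - 1 - i = k := by exact_mod_cast this
        omega
      right; left
      rw [h1, h2]
    · have h1 : j = c := by
        have := congrArg Prod.fst hx; simp at this; exact_mod_cast this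
      have h2 : i = M-2-k := by
        have := congrArg Prod.snd hx; simp at this
        have hMk : ((M - 1 - i : Nat) : Int) = (k:Int) + 1 := this
        omega
      left
      rw [h1, h2]
    · have h1 : j = c + 1 := by
        have := congrArg Prod.fst hx; simp at this
        have : ((j:Nat):Int) = (c:Int) + 1 := this
        omega
      have h2 : i = (M-2-k) + 1 := by
        have := congrArg Prod.snd hx; simp at this
        have hMk : M - 1 - i = k := by exact_mod_cast this
        omega
      right; right; right
      rw [h1, h2]
    · have h1 : j = c + 1 := by
        have := congrArg Prod.fst hx; simp at this
        have : ((j:Nat):Int) = (c:Int) + 1 := this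
        omega
      have h2 : i = M-2-k := by
        have := congrArg Prod.snd hx; simp at this
        have hMk : ((M - 1 - i : Nat) : Int) = (k:Int) + 1 := this
        omega
      right; right; left
      rw [h1, h2]

theorem scan_counts (M N : Nat) (g cols : List (List Char)) (hRep : RepAB M N g cols) :
    (bScan (N:Int) cols).length = (aScan (M:Int) (N:Int) g).length := by
  have hSA := nodup_aScan (M:Int) (N:Int) g
  have hSB := nodup_bScan (N:Int) cols
  rw [← List.toFinset_card_of_nodup hSB, ← List.toFinset_card_of_nodup hSA]
  symm
  apply Finset.card_bij (fun p _ =>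
    ((PySem.Int.mod p (N:Int)), ((M:Int) - 1 - PySem.Int.floordiv p (N:Int))))
  · intro p hp
    rw [List.mem_toFinset] at hp ⊢
    rw [mem_aScan] at hp
    obtain ⟨r, c, hr, hc, rfl⟩ := PA_form M N g p hp
    have hdec := encP_decode N r c hc
    rw [hdec.1, hdec.2]
    rw [mem_bScan]
    have hcast : ((M:Int)) - 1 - (r:Int) = (((M-1-r : Nat)):Int) := by omega
    rw [hcast]
    exact (PA_iff_PB M N g cols hRep r c hr hc).mp hp
  · intro p1 hp1 p2 hp2 heq
    rw [List.mem_toFinset, mem_aScan] at hp1 hp2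
    obtain ⟨r1, c1, hr1, hc1, rfl⟩ := PA_form M N g p1 hp1
    obtain ⟨r2, c2, hr2, hc2, rfl⟩ := PA_form M N g p2 hp2
    have d1 := encP_decode N r1 c1 hc1
    have d2 := encP_decode N r2 c2 hc2
    rw [d1.1, d1.2, d2.1, d2.2] at heq
    have h1 : ((c1:Int)) = (c2:Int) := congrArg Prod.fst heq
    have h2 : ((M:Int)) - 1 - (r1:Int) = (M:Int) - 1 - (r2:Int) := congrArg Prod.snd heq
    have hcc : c1 = c2 := by omega
    have hrr : r1 = r2 := by omega
    rw [hcc, hrr]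
  · intro q hq
    rw [List.mem_toFinset, mem_bScan] at hq
    obtain ⟨c, k, hc, hk, rfl⟩ := PB_form M N g cols hRep q hq
    refine ⟨encP N (M-1-k) c, ?_, ?_⟩
    · rw [List.mem_toFinset, mem_aScan]
      apply (PA_iff_PB M N g cols hRep (M-1-k) c (by omega) (by omega)).mpr
      have : (((M-1-(M-1-k) : Nat)):Int) = (k:Int) := by omega
      rw [this]
      exact hq
    · have hdec := encP_decode N (M-1-k) c (by omega)
      rw [hdec.1, hdec.2]
      have : ((M:Int)) - 1 - ((M-1-k : Nat):Int) = (k:Int) := by omega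
      rw [this]

-- basic board accessors
theorem length_aSet (g : List (List Char)) (r c : Nat) (v : Char) :
    (aSet g r c v).length = g.length := by
  simp [aSet]

theorem rowlen_aSet (g : List (List Char)) (r c : Nat) (v : Char) (i : Nat) :
    ((aSet g r c v).getD i []).length = (g.getD i []).length := by
  simp only [aSet, List.getD_eq_getElem?_getD, List.getElem?_modify]
  cases h : g[i]? with
  | none => simp
  | some row =>
    by_cases hri : r = i <;> simp [hri]

theorem shape_aSet {M N : Nat} {g : List (List Char)} (h : Shape M N g) (r c : Nat) (v : Char) :
    Shape M N (aSet g r c v) := by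
  obtain ⟨h1, h2⟩ := h
  refine ⟨by rw [length_aSet]; exact h1, ?_⟩
  intro i hi
  rw [rowlen_aSet]
  exact h2 i hi

theorem aGet_aSet (g : List (List Char)) (r c : Nat) (v : Char)
    (hr : r < g.length) (hc : c < (g.getD r []).length) (i j : Nat) :
    aGet (aSet g r c v) i j = if r = i ∧ c = j then v else aGet g i j := by
  unfold aGet aSet
  simp only [List.getD_eq_getElem?_getD, List.getElem?_modify]
  by_cases hri : r = i
  · subst hri
    have : ∃ row, g[r]? = some row := ⟨g[r]'hr, List.getElem?_eq_getElem hr⟩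
    obtain ⟨row, hrow⟩ := this
    have hrowD : (g.getD r []) = row := by
      simp [List.getD_eq_getElem?_getD, hrow]
    rw [hrowD] at hc
    simp only [hrow]
    by_cases hcj : c = j
    · subst hcj; simp [hc]
    · simp [hcj]
  · simp [hri]

-- delete(): count and cells
theorem aDelete_spec (M N : Nat) (g : List (List Char)) (l : List Int)
    (hl : ∀ p ∈ l, ∃ r c : Nat, r < M ∧ c < N ∧ p = encP N r c) (hg : Shape M N g) :
    (aDelete (N:Int) g l).2 = (l.length : Int) ∧ Shape M N (aDelete (N:Int) g l).1 ∧
      ∀ i j : Nat, i < M → j < N →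
        aGet (aDelete (N:Int) g l).1 i j = if encP N i j ∈ l then '0' else aGet g i j := by
  have aux : ∀ (l : List Int) (g : List (List Char)) (a : Int),
      (∀ p ∈ l, ∃ r c : Nat, r < M ∧ c < N ∧ p = encP N r c) → Shape M N g →
      (l.foldl (fun gc p =>
          (aSet gc.1 (PySem.Int.floordiv p (N:Int)).toNat (PySem.Int.mod p (N:Int)).toNat '0',
            gc.2 + 1)) (g, a)).2 = a + (l.length : Int) ∧
      Shape M N (l.foldl (fun gc p =>
          (aSet gc.1 (PySem.Int.floordiv p (N:Int)).toNat (PySem.Int.mod p (N:Int)).toNat '0',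
            gc.2 + 1)) (g, a)).1 ∧
      ∀ i j : Nat, i < M → j < N →
        aGet (l.foldl (fun gc p =>
          (aSet gc.1 (PySem.Int.floordiv p (N:Int)).toNat (PySem.Int.mod p (N:Int)).toNat '0',
            gc.2 + 1)) (g, a)).1 i j = if encP N i j ∈ l then '0' else aGet g i j := by
    intro l
    induction l with
    | nil => intro g a _ hgs; refine ⟨by simp, hgs, ?_⟩; intro i j _ _; simp
    | cons p l ih =>
      intro g a hl hgs
      obtain ⟨r, c, hr, hc, rfl⟩ := hl p (List.mem_cons_self ..)
      have hdec := encP_decode N r c hc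
      have hrow : (PySem.Int.floordiv (encP N r c) (N:Int)).toNat = r := by
        rw [hdec.1]; omega
      have hcol : (PySem.Int.mod (encP N r c) (N:Int)).toNat = c := by
        rw [hdec.2]; omega
      simp only [List.foldl_cons, hrow, hcol]
      obtain ⟨ihc, ihs, ihv⟩ := ih (aSet g r c '0') (a+1)
        (fun q hq => hl q (List.mem_cons_of_mem _ hq)) (shape_aSet hgs r c '0')
      refine ⟨by rw [ihc]; push_cast [List.length_cons]; ring, ihs, ?_⟩
      intro i j hi hj
      rw [ihv i j hi hj]
      obtain ⟨hgl, hgr⟩ := hgs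
      rw [aGet_aSet g r c '0' (by omega) (by have := hgr r hr; omega) i j]
      by_cases hmem : encP N i j ∈ l
      · simp [hmem, List.mem_cons]
      · by_cases heq : r = i ∧ c = j
        · obtain ⟨rfl, rfl⟩ := heq
          simp [List.mem_cons]
        · have hne : encP N i j ≠ encP N r c := by
            intro hEq
            exact heq ⟨((encP_inj N i j r c hj hc hEq).1).symm, ((encP_inj N i j r c hj hc hEq).2).symm⟩
          simp only [List.mem_cons, if_neg hmem, if_neg heq]
          rw [if_neg (show ¬(encP N i j = encP N r c ∨ encP N i j ∈ l) from fun h => h.elim hne hmem)]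
  obtain ⟨h1, h2, h3⟩ := aux l g 0 hl hg
  exact ⟨by simpa using h1, h2, h3⟩

-- update_board(): proof-side normal form
def tempCol (M : Nat) (g : List (List Char)) (j : Nat) : List Char :=
  ((List.range M).filter (fun k => aGet g (M-1-k) j != '0')).map (fun k => aGet g (M-1-k) j)

theorem length_tempCol_le (M : Nat) (g : List (List Char)) (j : Nat) :
    (tempCol M g j).length ≤ M := by
  unfold tempCol
  calc (((List.range M).filter (fun k => aGet g (M-1-k) j != '0')).map
          (fun k => aGet g (M-1-k) j)).length
      = ((List.range M).filter (fun k => aGet g (M-1-k) j != '0')).length := List.length_map ..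
    _ ≤ (List.range M).length := List.length_filter_le ..
    _ = M := List.length_range

theorem zero_not_mem_tempCol (M : Nat) (g : List (List Char)) (j : Nat) :
    '0' ∉ tempCol M g j := by
  intro h
  unfold tempCol at h
  obtain ⟨k, hk, hv⟩ := List.mem_map.mp h
  have := List.mem_filter.mp hk
  rw [hv] at this
  simp at this

def writeColP (M : Nat) (g : List (List Char)) (c : Nat) (t : List Char) : List (List Char) :=
  (List.range M).foldl (fun g r => aSet g r c (t.getD (M-1-r) '0')) g

def tempFull (M : Nat) (g : List (List Char)) (j : Nat) : List Char :=
  tempCol M g j ++ List.replicate (M - (tempCol M g j).length) '0'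

def colPassN (M : Nat) (g : List (List Char)) (c : Nat) : List (List Char) :=
  writeColP M g c (tempFull M g c)

theorem pyGetD_neg_char (xs : List Char) (r L : Nat) (hL : xs.length = L) (hr : r < L) :
    PySem.List.pyGetD xs (-(r:Int)-1) '0' = xs.getD (L - 1 - r) '0' := by
  subst hL
  simp only [PySem.List.pyGetD, PySem.List.pyGet?, PySem.List.pyIdx?]
  rw [if_neg (by omega : ¬ (0:Int) ≤ -(r:Int)-1),
    if_pos (by omega : -(xs.length:Int) ≤ -(r:Int)-1)]
  have h1 : (-(-(r:Int) - 1)).toNat = r + 1 := by omega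
  have h2 : xs.length - (r+1) = xs.length - 1 - r := by omega
  rw [h1, h2]
  simp [List.getD_eq_getElem?_getD]

theorem toNat_cast_sub (a b : Nat) : ((a:Int) - (b:Int)).toNat = a - b := by omega

theorem aUpdate_eq (M N : Nat) (g : List (List Char)) :
    aUpdate (M:Int) (N:Int) g = (List.range N).foldl (fun g c => colPassN M g c) g := by
  unfold aUpdate
  rw [PySem.List.pyRange_zero_nat N, List.foldl_map]
  apply PySem.List.foldl_congr_mem
  intro acc cn _
  simp only [Int.toNat_natCast]
  rw [PySem.List.pyRange_neg_one]
  rw [show (((M:Int)-1) - (-1)).toNat = M from by omega]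
  rw [List.foldl_map]
  simp only [show ∀ k : Nat, (((M:Int)-1-(k:Int))).toNat = M-1-k from fun k => by omega]
  rw [PySem.List.foldl_append_if]
  rw [List.nil_append]
  rw [PySem.List.pyRange_zero_nat M, List.foldl_map]
  simp only [toNat_cast_sub]
  unfold colPassN writeColP tempFull tempCol
  apply PySem.List.foldl_congr_mem
  intro acc2 r hrm
  simp only [Int.toNat_natCast]
  rw [pyGetD_neg_char _ r M
    (by
      rw [List.length_append, List.length_replicate]
      have := length_tempCol_le M acc cn
      unfold tempCol at this
      omega)
    (List.mem_range.mp hrm)]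

theorem writeColP_aux (M N : Nat) (c : Nat) (hc : c < N) (t : List Char) :
    ∀ (rs : List Nat) (g : List (List Char)), Shape M N g → (∀ r ∈ rs, r < M) →
      Shape M N (rs.foldl (fun g r => aSet g r c (t.getD (M-1-r) '0')) g) ∧
      ∀ i j : Nat, j < N →
        aGet (rs.foldl (fun g r => aSet g r c (t.getD (M-1-r) '0')) g) i j =
          if j = c ∧ i ∈ rs then t.getD (M-1-i) '0' else aGet g i j := by
  intro rs
  induction rs with
  | nil =>
    intro g hsh _
    refine ⟨hsh, ?_⟩
    intro i j _
    simp
  | cons r rs ih =>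
    intro g hsh hrs
    have hrM : r < M := hrs r (List.mem_cons_self ..)
    have hsh1 : Shape M N (aSet g r c (t.getD (M-1-r) '0')) := shape_aSet hsh r c _
    obtain ⟨ihs, ihv⟩ := ih (aSet g r c (t.getD (M-1-r) '0')) hsh1
      (fun x hx => hrs x (List.mem_cons_of_mem _ hx))
    refine ⟨ihs, ?_⟩
    intro i j hj
    rw [List.foldl_cons, ihv i j hj]
    rw [aGet_aSet g r c _ (by have := hsh.1; omega) (by have := hsh.2 r hrM; omega) i j]
    by_cases hmem : j = c ∧ i ∈ rs
    · rw [if_pos hmem, if_pos ⟨hmem.1, List.mem_cons_of_mem _ hmem.2⟩]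
    · rw [if_neg hmem]
      by_cases hri : r = i ∧ c = j
      · obtain ⟨rfl, rfl⟩ := hri
        rw [if_pos (⟨rfl, rfl⟩ : r = r ∧ c = c), if_pos ⟨rfl, List.mem_cons_self ..⟩]
      · rw [if_neg hri]
        rw [if_neg (by
          rintro ⟨rfl, hmem2⟩
          rcases List.mem_cons.mp hmem2 with rfl | hmem3
          · exact hri ⟨rfl, rfl⟩
          · exact hmem ⟨rfl, hmem3⟩)]

theorem tempCol_congr (M : Nat) (g g' : List (List Char)) (j : Nat)
    (h : ∀ i < M, aGet g i j = aGet g' i j) : tempCol M g j = tempCol M g' j := by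
  unfold tempCol
  have hval : ∀ k ∈ List.range M, aGet g (M-1-k) j = aGet g' (M-1-k) j := by
    intro k hk
    have := List.mem_range.mp hk
    exact h (M-1-k) (by omega)
  rw [List.filter_congr (fun k hk => by rw [hval k hk])]
  apply List.map_congr_left
  intro k hk
  exact hval k (List.mem_of_mem_filter hk)

theorem outer_spec (M N : Nat) :
    ∀ (cs : List Nat) (g : List (List Char)), cs.Nodup → (∀ c ∈ cs, c < N) → Shape M N g →
      Shape M N (cs.foldl (fun g c => colPassN M g c) g) ∧
      ∀ i j : Nat, i < M → j < N →
        aGet (cs.foldl (fun g c => colPassN M g c) g) i j =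
          if j ∈ cs then (tempFull M g j).getD (M-1-i) '0' else aGet g i j := by
  intro cs
  induction cs with
  | nil =>
    intro g _ _ hsh
    refine ⟨hsh, ?_⟩
    intro i j _ _
    simp
  | cons c cs ih =>
    intro g hnd hcs hsh
    have hcN : c < N := hcs c (List.mem_cons_self ..)
    have hg1 : Shape M N (colPassN M g c) :=
      (writeColP_aux M N c hcN _ (List.range M) g hsh (fun r hr => List.mem_range.mp hr)).1
    obtain ⟨ihs, ihv⟩ := ih (colPassN M g c) (hnd.of_cons)
      (fun x hx => hcs x (List.mem_cons_of_mem _ hx)) hg1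
    have hwv := (writeColP_aux M N c hcN (tempFull M g c) (List.range M) g hsh
      (fun r hr => List.mem_range.mp hr)).2
    have hg1get : ∀ i j : Nat, j < N → j ≠ c →
        aGet (colPassN M g c) i j = aGet g i j := by
      intro i j hj hne
      unfold colPassN writeColP
      rw [hwv i j hj, if_neg (by rintro ⟨rfl, _⟩; exact hne rfl)]
    refine ⟨ihs, ?_⟩
    intro i j hi hj
    rw [List.foldl_cons, ihv i j hi hj]
    by_cases hmem : j ∈ cs
    · rw [if_pos hmem, if_pos (List.mem_cons_of_mem _ hmem)]
      have hjc : j ≠ c := by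
        intro h
        exact (List.nodup_cons.mp hnd).1 (h ▸ hmem)
      have : tempFull M (colPassN M g c) j = tempFull M g j := by
        unfold tempFull
        rw [tempCol_congr M (colPassN M g c) g j (fun i hi => hg1get i j hj hjc)]
      rw [this]
    · rw [if_neg hmem]
      by_cases hjc : j = c
      · subst hjc
        rw [if_pos (List.mem_cons_self ..)]
        unfold colPassN writeColP
        rw [hwv i j hj, if_pos ⟨rfl, List.mem_range.mpr hi⟩]
      · rw [if_neg (by
          intro h
          rcases List.mem_cons.mp h with h | h
          · exact hjc h
          · exact hmem h)]
        exact hg1get i j hj hjc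

theorem colAt_temp (M : Nat) (g : List (List Char)) (j i : Nat) (hi : i < M) :
    (tempFull M g j).getD (M-1-i) '0' = colAt M (tempCol M g j) i := by
  have hle := length_tempCol_le M g j
  unfold tempFull colAt
  by_cases hzero : i < M - (tempCol M g j).length
  · rw [if_pos hzero]
    have hidx : (tempCol M g j).length ≤ M - 1 - i := by omega
    rw [List.getD_eq_getElem?_getD, List.getElem?_append_right hidx]
    rw [List.getElem?_replicate]
    rw [if_pos (by omega)]
    rfl
  · rw [if_neg hzero]
    have hidx : M - 1 - i < (tempCol M g j).length := by omega
    rw [List.getD_eq_getElem?_getD, List.getElem?_append_left hidx,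
      ← List.getD_eq_getElem?_getD]

theorem aUpdate_spec (M N : Nat) (g : List (List Char)) (hg : Shape M N g) :
    Shape M N (aUpdate (M:Int) (N:Int) g) ∧
      ∀ i j : Nat, i < M → j < N →
        aGet (aUpdate (M:Int) (N:Int) g) i j = colAt M (tempCol M g j) i := by
  rw [aUpdate_eq]
  obtain ⟨hs, hv⟩ := outer_spec M N (List.range N) g (List.nodup_range)
    (fun c hc => List.mem_range.mp hc) hg
  refine ⟨hs, ?_⟩
  intro i j hi hj
  rw [hv i j hi hj, if_pos (List.mem_range.mpr hj)]
  exact colAt_temp M g j i hi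


theorem set_len_eq {α : Type} (s : PySem.Set α) : PySem.Set.len s = (s.length : Int) := rfl

theorem take_ne_zero (t : List Char) (Nn j : Nat) (h0 : '0' ∉ t.take Nn) (hj : j < Nn)
    (hjt : j < t.length) : t.getD j '0' ≠ '0' := by
  intro h
  apply h0
  rw [List.getD_eq_getElem?_getD, List.getElem?_eq_getElem hjt] at h
  have hjt' : j < (t.take Nn).length := by rw [List.length_take]; omega
  have hEq : (t.take Nn)[j] = t[j] := List.getElem_take
  rw [← h, ← hEq]
  exact List.getElem_mem hjt'

-- gravity on B's side is a filter
theorem bRebuild_spec (dead : PySem.Set (Int × Int)) (cols : List (List Char)) :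
    (bRebuild dead cols).length = cols.length ∧
      ∀ j < cols.length, (bRebuild dead cols).getD j [] =
        ((List.range (cols.getD j []).length).filter
            (fun (k : Nat) => !(PySem.Set.contains dead ((j:Int),(k:Int))))).map
          (fun k => (cols.getD j []).getD k '0') := by
  constructor
  · unfold bRebuild
    rw [List.length_map, PySem.List.length_enumerate]
  · intro j hj
    unfold bRebuild
    have hsome : cols[j]? = some (cols.getD j []) := by
      rw [List.getElem?_eq_getElem hj, List.getD_eq_getElem?_getD, List.getElem?_eq_getElem hj]
      rfl
    rw [List.getD_eq_getElem?_getD, List.getElem?_map, PySem.List.getElem?_enumerate, hsome]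
    simp only [Option.map_some, Option.getD_some]
    have hcol : PySem.List.enumerate (cols.getD j []) =
        (List.range (cols.getD j []).length).map
          (fun (k : Nat) => ((k:Int), (cols.getD j []).getD k '0')) := by
      rw [PySem.List.enumerate_eq_map_pyRange _ '0']
      rw [show PySem.List.len (cols.getD j []) = ((cols.getD j []).length : Int) from by
        simp [PySem.List.len]]
      rw [PySem.List.pyRange_zero_nat, List.map_map]
      apply List.map_congr_left
      intro k _
      simp [PySem.List.pyGetD_natCast]
    rw [hcol, List.filter_map, List.map_map]
    simp only [Function.comp_def, zero_add]

-- one round preserves the relation and produces equal counts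
theorem round_spec (M N : Nat) (g cols : List (List Char)) (hRep : RepAB M N g cols) :
    (aDelete (N:Int) g (aScan (M:Int) (N:Int) g)).2 = PySem.Set.len (bScan (N:Int) cols) ∧
      RepAB M N (aUpdate (M:Int) (N:Int) (aDelete (N:Int) g (aScan (M:Int) (N:Int) g)).1)
        (bRebuild (bScan (N:Int) cols) cols) := by
  obtain ⟨hsh, hclen, hcol⟩ := hRep
  have hform : ∀ p ∈ aScan (M:Int) (N:Int) g, ∃ r c : Nat, r < M ∧ c < N ∧ p = encP N r c :=
    fun p hp => PA_form M N g p ((mem_aScan M N g p).mp hp)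
  obtain ⟨hcnt, hshape', hcell'⟩ := aDelete_spec M N g (aScan (M:Int) (N:Int) g) hform hsh
  have hlen : (bScan (N:Int) cols).length = (aScan (M:Int) (N:Int) g).length :=
    scan_counts M N g cols ⟨hsh, hclen, hcol⟩
  refine ⟨by rw [hcnt, set_len_eq]; exact_mod_cast hlen.symm, ?_⟩
  obtain ⟨hupds, hupdv⟩ := aUpdate_spec M N _ hshape'
  obtain ⟨hrblen, hrbval⟩ := bRebuild_spec (bScan (N:Int) cols) cols
  refine ⟨hupds, by rw [hrblen, hclen], ?_⟩
  intro j hj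
  obtain ⟨hLm, hL0, hLv⟩ := hcol j hj
  have hnew : tempCol M (aDelete (N:Int) g (aScan (M:Int) (N:Int) g)).1 j =
      ((List.range (cols.getD j []).length).filter
        (fun (k : Nat) => !(PySem.Set.contains (bScan (N:Int) cols) ((j:Int),(k:Int))))).map
        (fun (k : Nat) => (cols.getD j []).getD k '0') := by
    have hcell : ∀ k, k < M →
        aGet (aDelete (N:Int) g (aScan (M:Int) (N:Int) g)).1 (M-1-k) j =
          if encP N (M-1-k) j ∈ aScan (M:Int) (N:Int) g then '0' else aGet g (M-1-k) j :=
      fun k hk => hcell' (M-1-k) j (by omega) hj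
    have hmem : ∀ k, k < M →
        (encP N (M-1-k) j ∈ aScan (M:Int) (N:Int) g ↔
          ((j:Int),(k:Int)) ∈ bScan (N:Int) cols) := by
      intro k hk
      rw [mem_aScan, mem_bScan]
      have h2 := PA_iff_PB M N g cols ⟨hsh, hclen, hcol⟩ (M-1-k) j (by omega) hj
      rw [show M-1-(M-1-k) = k from by omega] at h2
      exact h2
    unfold tempCol
    have hsplit : List.range M = List.range (cols.getD j []).length ++
        (List.range (M - (cols.getD j []).length)).map (fun x => (cols.getD j []).length + x) := by
      rw [← List.range_add]
      congr 1
      omega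
    rw [hsplit, List.filter_append, List.map_append]
    have hpart2 : ((List.range (M - (cols.getD j []).length)).map
        (fun x => (cols.getD j []).length + x)).filter
        (fun k => aGet (aDelete (N:Int) g (aScan (M:Int) (N:Int) g)).1 (M-1-k) j != '0') = [] := by
      rw [List.filter_eq_nil_iff]
      intro k hk
      obtain ⟨x, hx, rfl⟩ := List.mem_map.mp hk
      have hxM := List.mem_range.mp hx
      rw [hcell ((cols.getD j []).length + x) (by omega)]
      by_cases hmem2 : encP N (M-1-((cols.getD j []).length + x)) j ∈ aScan (M:Int) (N:Int) g
      · rw [if_pos hmem2]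
        simp
      · rw [if_neg hmem2, hLv (M-1-((cols.getD j []).length + x)) (by omega),
          colAt_eq_zero _ _ _ (by omega)]
        simp
    rw [hpart2, List.map_nil, List.append_nil]
    have hval1 : ∀ k, k < (cols.getD j []).length →
        aGet (aDelete (N:Int) g (aScan (M:Int) (N:Int) g)).1 (M-1-k) j =
          if ((j:Int),(k:Int)) ∈ bScan (N:Int) cols then '0' else (cols.getD j []).getD k '0' := by
      intro k hkh
      rw [hcell k (by omega)]
      by_cases hb : ((j:Int),(k:Int)) ∈ bScan (N:Int) cols
      · rw [if_pos ((hmem k (by omega)).mpr hb), if_pos hb]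
      · rw [if_neg (fun hx => hb ((hmem k (by omega)).mp hx)), if_neg hb,
          hLv (M-1-k) (by omega), colAt_eq_get _ _ _ (by omega),
          show M-1-(M-1-k) = k from by omega]
    have hfilter : (List.range (cols.getD j []).length).filter
        (fun k => aGet (aDelete (N:Int) g (aScan (M:Int) (N:Int) g)).1 (M-1-k) j != '0') =
        (List.range (cols.getD j []).length).filter
          (fun (k : Nat) => !(PySem.Set.contains (bScan (N:Int) cols) ((j:Int),(k:Int)))) := by
      apply List.filter_congr
      intro k hk
      have hk' := List.mem_range.mp hk
      rw [hval1 k hk']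
      by_cases hb : ((j:Int),(k:Int)) ∈ bScan (N:Int) cols
      · simp [hb]
      · rw [if_neg hb]
        have hcontf : (bScan (N:Int) cols).contains ((j:Int),(k:Int)) = false := by
          rw [Bool.eq_false_iff]
          intro hct
          exact hb ((PySem.Set.contains_iff _ _).mp hct)
        rw [hcontf]
        simp only [Bool.not_false, bne_iff_ne, ne_eq]
        exact getD_ne_zero _ hL0 k hk'
    rw [hfilter]
    apply List.map_congr_left
    intro k hk
    have hkmem := List.mem_range.mp (List.mem_of_mem_filter hk)
    have hbk : ¬ ((j:Int),(k:Int)) ∈ bScan (N:Int) cols := by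
      have h1 := List.of_mem_filter hk
      simp only [Bool.not_eq_true'] at h1
      intro hb
      exact (Bool.eq_false_iff.mp h1) ((PySem.Set.contains_iff _ _).mpr hb)
    rw [hval1 k hkmem, if_neg hbk]
  have hrb := hrbval j (by omega)
  refine ⟨?_, ?_, ?_⟩
  · rw [hrb, ← hnew]
    exact length_tempCol_le M _ j
  · rw [hrb, ← hnew]
    exact zero_not_mem_tempCol M _ j
  · intro i hi
    rw [hupdv i j hi hj, hrb, ← hnew]

theorem loop_eq (M N : Nat) :
    ∀ (fuel : Nat) (g cols : List (List Char)) (ans : Int), RepAB M N g cols →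
      aLoop (M:Int) (N:Int) fuel g ans = bLoop (N:Int) fuel cols ans := by
  intro fuel
  induction fuel with
  | zero => intro g cols ans _; rfl
  | succ f ih =>
    intro g cols ans hRep
    obtain ⟨hcnt, hRep'⟩ := round_spec M N g cols hRep
    show (let gc := aDelete (N:Int) g (aScan (M:Int) (N:Int) g);
        if gc.2 = 0 then ans else aLoop (M:Int) (N:Int) f (aUpdate (M:Int) (N:Int) gc.1) (ans + gc.2)) =
      (let dead := bScan (N:Int) cols;
        if dead = [] then ans else bLoop (N:Int) f (bRebuild dead cols) (ans + PySem.Set.len dead))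
    dsimp only
    rw [hcnt]
    by_cases hz : bScan (N:Int) cols = []
    · rw [if_pos hz, if_pos (by rw [hz]; rfl)]
    · rw [if_neg hz, if_neg (by
        rw [set_len_eq]
        intro h0
        exact hz (List.length_eq_zero_iff.mp (by exact_mod_cast h0)))]
      exact ih _ _ _ hRep'

theorem init_rep (M N : Nat) (boards : List String) (hM : 2 ≤ M) (hN : 2 ≤ N)
    (hlen : M ≤ boards.length)
    (hrow : ∀ s ∈ boards.take M, N ≤ s.length ∧ '0' ∉ s.toList.take N) :
    RepAB M N (boards.map String.toList) (bCols (M:Int) (N:Int) boards) := by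
  have hrowlen : ∀ i < M, N ≤ ((boards.map String.toList).getD i []).length := by
    intro i hi
    have hib : i < boards.length := by omega
    have hmem : boards[i] ∈ boards.take M := by
      have h1 : i < (boards.take M).length := by rw [List.length_take]; omega
      have h2 : (boards.take M)[i] = boards[i] := List.getElem_take
      exact h2 ▸ List.getElem_mem h1
    obtain ⟨hN, _⟩ := hrow _ hmem
    rw [List.getD_eq_getElem?_getD, List.getElem?_map, List.getElem?_eq_getElem hib]
    simp only [Option.map_some, Option.getD_some]
    rw [String.length_toList]
    omega
  have hrowchar : ∀ i j : Nat, i < M → j < N →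
      ((boards.getD i "").toList).getD j '0' ≠ '0' := by
    intro i j hi hj
    have hib : i < boards.length := by omega
    have hmem : boards[i] ∈ boards.take M := by
      have h1 : i < (boards.take M).length := by rw [List.length_take]; omega
      have h2 : (boards.take M)[i] = boards[i] := List.getElem_take
      exact h2 ▸ List.getElem_mem h1
    obtain ⟨hN, h0⟩ := hrow _ hmem
    have hsome : boards.getD i "" = boards[i] := by
      rw [List.getD_eq_getElem?_getD, List.getElem?_eq_getElem hib]
      rfl
    rw [hsome]
    exact take_ne_zero _ N j h0 hj (by rw [String.length_toList]; omega)
  have hbc : ∀ j, j < N → (bCols (M:Int) (N:Int) boards).getD j [] =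
      (List.range M).map (fun k => ((boards.getD (M-1-k) "").toList).getD j '0') := by
    intro j hj
    unfold bCols
    rw [PySem.List.pyRange_zero_nat N, List.map_map]
    rw [List.getD_eq_getElem?_getD, List.getElem?_map, List.getElem?_range hj]
    simp only [Option.map_some, Option.getD_some, Function.comp_def, Int.toNat_natCast]
    rw [PySem.List.pyRange_neg_one]
    rw [show (((M:Int)-1) - (-1)).toNat = M from by omega]
    rw [List.foldl_map]
    simp only [show ∀ k : Nat, (((M:Int)-1-(k:Int))).toNat = M-1-k from fun k => by omega]
    rw [PySem.List.foldl_append_if, List.nil_append]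
    have hkeep : (List.range M).filter
        (fun k => ((boards.getD (M-1-k) "").toList).getD j '0' != '0') = List.range M := by
      rw [List.filter_eq_self]
      intro k hk
      have hkM := List.mem_range.mp hk
      have := hrowchar (M-1-k) j (by omega) hj
      simp only [bne_iff_ne, ne_eq]
      exact this
    rw [hkeep]
  refine ⟨⟨by rw [List.length_map]; omega, hrowlen⟩, ?_, ?_⟩
  · unfold bCols
    rw [List.length_map, PySem.List.length_pyRange_one]
    omega
  · intro j hj
    rw [hbc j hj]
    have hlenM : ((List.range M).map
        (fun k => ((boards.getD (M-1-k) "").toList).getD j '0')).length = M := by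
      rw [List.length_map, List.length_range]
    refine ⟨by omega, ?_, ?_⟩
    · intro hmem0
      obtain ⟨k, hk, hv⟩ := List.mem_map.mp hmem0
      have hkM := List.mem_range.mp hk
      exact hrowchar (M-1-k) j (by omega) hj hv
    · intro i hi
      unfold colAt
      rw [hlenM]
      rw [if_neg (by omega)]
      rw [PySem.List.getD_map_range _ _ _ _ (by omega : M-1-i < M)]
      rw [show M-1-(M-1-i) = i from by omega]
      unfold aGet
      have hib : i < boards.length := by omega
      have hrow0 : (List.map String.toList boards).getD i [] = boards[i].toList := by
        rw [List.getD_eq_getElem?_getD, List.getElem?_map, List.getElem?_eq_getElem hib]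
        rfl
      have hsome : boards.getD i "" = boards[i] := by
        rw [List.getD_eq_getElem?_getD, List.getElem?_eq_getElem hib]
        rfl
      rw [hrow0, hsome]

theorem foldl_id {α β : Type} (l : List β) (a : α) : l.foldl (fun a _ => a) a = a := by
  induction l with
  | nil => rfl
  | cons b l ih => simpa using ih

theorem aScan_nil (m n : Int) (g : List (List Char)) (h : m < 2 ∨ n < 2) :
    aScan m n g = [] := by
  unfold aScan
  rcases h with hm | hn
  · rw [PySem.List.pyRange_one_eq_nil (by omega : m - 1 ≤ 0)]
    rfl
  · rw [PySem.List.pyRange_one_eq_nil (by omega : n - 1 ≤ 0)]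
    simp only [List.foldl_nil]
    exact foldl_id _ _

-- ===== VERDICT (by name: the statement is the Claim_ definition above) =====

-- ===== VERDICT (by name: the statement is the Claim_ definition above) =====
theorem solution_spec : Claim_equal_solution := by
  intro m n boards _ hPre
  unfold Spec_solution solution solution_alt
  by_cases hsmall : m < 2 ∨ n < 2
  · simp only [hsmall, if_true]
    obtain ⟨fuel, hfuel⟩ : ∃ f, m.toNat * n.toNat + 1 = f + 1 := ⟨m.toNat * n.toNat, rfl⟩
    rw [hfuel]
    simp [aLoop, aScan_nil m n _ hsmall, aDelete]
  · push Not at hsmall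
    obtain ⟨hm2, hn2⟩ := hsmall
    obtain ⟨hlen, hrow⟩ := hPre hm2 hn2
    have hm : m = (m.toNat : Int) := (Int.toNat_of_nonneg (by omega)).symm
    have hn : n = (n.toNat : Int) := (Int.toNat_of_nonneg (by omega)).symm
    rw [if_neg (by omega)]
    rw [hm, hn]
    apply loop_eq m.toNat n.toNat
    apply init_rep m.toNat n.toNat boards (by omega) (by omega) (by omega)
    intro s hs
    have := hrow s (by simpa using hs)
    exact ⟨by omega, this.2⟩
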